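-- pv_equiv track=rewrite | github.com/dbconfession78/interview_prep | codefights/farming_resources.py | get_times_no_impass
-- ===== SOURCE A (Python) =====
-- def get_times_no_impass(start, end, troops):
--     curr = start
--     retval = 0
--     while curr[0] != end[0]:
--         if end[0] < curr[0]:
--             curr[0] -= 1
--         else:
--             curr[0] += 1
--         retval += troops
--
--     while curr[1] != end[1]:
--         if end[1] < curr[1]:
--             curr[1] -= 1
--         else:
--             curr[1] += 1
--         retval += troops
--
--     return retval
-- ===== SOURCE B (Python) =====
-- def get_times_no_impass(start, end, troops):
--     return (abs(end[0] - start[0]) + abs(end[1] - start[1])) * troops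
-- ===== Notes on version B (the rewrite author's own statement) =====
-- stated objective: faster
-- what changed: Replaces the two step-by-step walking loops (one troops increment per unit of distance) with the closed-form Manhattan distance times troops.
import Mathlib
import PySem

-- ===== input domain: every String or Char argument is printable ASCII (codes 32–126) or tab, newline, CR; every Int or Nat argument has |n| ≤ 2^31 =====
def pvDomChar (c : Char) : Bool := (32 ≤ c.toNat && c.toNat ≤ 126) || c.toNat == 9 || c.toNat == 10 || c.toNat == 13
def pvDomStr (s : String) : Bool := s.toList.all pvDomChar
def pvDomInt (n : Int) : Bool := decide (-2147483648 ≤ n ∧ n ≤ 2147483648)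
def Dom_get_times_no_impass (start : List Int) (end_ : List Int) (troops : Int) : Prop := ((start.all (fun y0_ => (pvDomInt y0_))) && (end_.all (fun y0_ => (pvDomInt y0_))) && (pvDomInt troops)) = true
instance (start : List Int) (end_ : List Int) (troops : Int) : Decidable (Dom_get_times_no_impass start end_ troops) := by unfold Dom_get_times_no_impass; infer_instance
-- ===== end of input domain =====

-- B replaces A's per-unit-step walking loops with the closed-form Manhattan distance * troops (faster).
-- Python A mutates its `start` list in place; the equivalence proved here is about the RETURN value only.

-- ===== PORT A =====
-- A's while loop: step curr by ±1 toward e, adding troops each step.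
def pvWalkLoop (curr e troops retval : Int) : Int :=
  if curr ≠ e then
    if e < curr then pvWalkLoop (curr - 1) e troops (retval + troops)
    else pvWalkLoop (curr + 1) e troops (retval + troops)
  else retval
termination_by (e - curr).natAbs
decreasing_by all_goals omega

def get_times_no_impass (start : List Int) (end_ : List Int) (troops : Int) : Int :=
  match PySem.List.pyGet? start 0, PySem.List.pyGet? start 1,
        PySem.List.pyGet? end_ 0, PySem.List.pyGet? end_ 1 with
  | some s0, some s1, some e0, some e1 =>
      pvWalkLoop s1 e1 troops (pvWalkLoop s0 e0 troops 0)
  | _, _, _, _ => 0  -- IndexError in Python; excluded by Pre_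

-- ===== PORT B =====
def get_times_no_impass_alt (start : List Int) (end_ : List Int) (troops : Int) : Int :=
  (((PySem.List.pyGet? end_ 0).bind fun e0 =>
    ((PySem.List.pyGet? start 0).bind fun s0 =>
     ((PySem.List.pyGet? end_ 1).bind fun e1 =>
      ((PySem.List.pyGet? start 1).map fun s1 =>
        ((e0 - s0).natAbs + (e1 - s1).natAbs : Int) * troops)))).getD 0)  -- none = IndexError in Python; excluded by Pre_

-- ===== PRECONDITION & SPEC =====
-- Pre_: both lists need indices 0 and 1; otherwise Python A raises IndexError.
def Pre_get_times_no_impass (start : List Int) (end_ : List Int) (troops : Int) : Prop :=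
  2 ≤ start.length ∧ 2 ≤ end_.length
instance (start : List Int) (end_ : List Int) (troops : Int) : Decidable (Pre_get_times_no_impass start end_ troops) := by unfold Pre_get_times_no_impass; infer_instance
def pvWitness_get_times_no_impass : List Int × List Int × Int := ([1, -2], [4, 3], 5)

def Spec_get_times_no_impass (start : List Int) (end_ : List Int) (troops : Int) (out : Int) : Prop := out = get_times_no_impass_alt start end_ troops
instance (start : List Int) (end_ : List Int) (troops : Int) (out : Int) : Decidable (Spec_get_times_no_impass start end_ troops out) := by unfold Spec_get_times_no_impass; infer_instance

-- ===== CLAIM (what is proved, stated in full; the proofs are below) =====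
def Claim_equal_get_times_no_impass : Prop := ∀ (start : List Int) (end_ : List Int) (troops : Int), Dom_get_times_no_impass start end_ troops → Pre_get_times_no_impass start end_ troops → Spec_get_times_no_impass start end_ troops (get_times_no_impass start end_ troops)

-- ===== LEMMAS AND PROOFS =====
theorem pvWalkLoop_eq (curr e troops retval : Int) :
    pvWalkLoop curr e troops retval = retval + ((e - curr).natAbs : Int) * troops := by
  generalize hn : (e - curr).natAbs = n
  induction n generalizing curr retval with
  | zero =>
    have : curr = e := by omega
    subst this
    rw [pvWalkLoop]
    simp
  | succ k ih =>
    have hne : curr ≠ e := by omega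
    rw [pvWalkLoop]
    simp only [hne, ne_eq, not_false_eq_true, if_pos]
    by_cases h : e < curr
    · rw [if_pos h, ih (curr - 1) (retval + troops) (by omega)]
      push_cast; ring
    · rw [if_neg h, ih (curr + 1) (retval + troops) (by omega)]
      push_cast
      have : ((e - curr).natAbs : Int) = k + 1 := by omega
      have : ((e - (curr + 1)).natAbs : Int) = k := by omega
      ring

-- ===== VERDICT (by name: the statement is the Claim_ definition above) =====
theorem get_times_no_impass_spec : Claim_equal_get_times_no_impass := by
  intro start end_ troops _ hpre
  obtain ⟨hs, he⟩ := hpre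
  unfold Spec_get_times_no_impass get_times_no_impass get_times_no_impass_alt
  have h0 := PySem.List.pyGet?_ofNat (xs := start) (n := 0) (by omega)
  have h1 := PySem.List.pyGet?_ofNat (xs := start) (n := 1) (by omega)
  have h2 := PySem.List.pyGet?_ofNat (xs := end_) (n := 0) (by omega)
  have h3 := PySem.List.pyGet?_ofNat (xs := end_) (n := 1) (by omega)
  norm_num at h0 h1 h2 h3
  rw [h0, h1, h2, h3]
  simp only [Option.bind_some, Option.map_some, Option.getD_some]
  simp only [pvWalkLoop_eq]
  push_cast; ring
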